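-- pv_equiv track=rewrite | github.com/zhangshaohu/client-and-server | server.py | verify_user
-- ===== SOURCE A (Python) =====
-- def verify_user(id, data):
--     """
--     verify the exsting user ID stored in the json file
--
--     :param user ID, ID list
--     :return bool, password
--     """
--     res = False
--     pw = ''
--     # Iterating through the json list
--     for db in data:
--         if(db['id'] == id):
--             res = True
--             pw = db['password']
--     return res, pw
-- ===== SOURCE B (Python) =====
-- def verify_user(id, data):
--     # Reverse early-exit traversal: the first match from the end is A's last match.
--     for db in reversed(data):
--         if db['id'] == id:
--             return True, db['password']
--     return False, ''
-- ===== Notes on version B (the rewrite author's own statement) =====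
-- stated objective: alternative
-- what changed: B replaces A's exhaustive forward scan that keeps overwriting a (res, pw) accumulator with an early-exit traversal of reversed(data) that returns on the first match (reverse-first == forward-last), with no accumulator state.
import Mathlib
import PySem

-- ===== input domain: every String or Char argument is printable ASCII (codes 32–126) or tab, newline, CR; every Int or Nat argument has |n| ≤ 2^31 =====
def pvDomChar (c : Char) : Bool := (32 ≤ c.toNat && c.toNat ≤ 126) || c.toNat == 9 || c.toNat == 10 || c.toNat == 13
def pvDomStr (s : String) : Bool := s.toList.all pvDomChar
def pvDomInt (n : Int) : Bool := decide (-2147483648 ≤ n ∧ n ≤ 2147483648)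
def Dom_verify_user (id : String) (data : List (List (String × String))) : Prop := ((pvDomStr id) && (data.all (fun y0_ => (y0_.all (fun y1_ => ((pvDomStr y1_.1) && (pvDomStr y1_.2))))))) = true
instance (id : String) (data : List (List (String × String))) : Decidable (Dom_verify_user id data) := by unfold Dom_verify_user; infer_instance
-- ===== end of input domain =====

-- B replaces A's exhaustive forward accumulator scan by an early-exit traversal of
-- the reversed list (reverse-first match == forward-last match); objective: alternative.


-- ===== PORT A =====
-- db[k]: first match in the association list (Python dict lookup); none = KeyError.
def kget (db : List (String × String)) (k : String) : Option String :=
  match db with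
  | [] => none
  | (k', v) :: rest => if k' == k then some v else kget rest k

-- total version used by the ports; exact where Pre_verify_user guarantees the key exists
def kgetD (db : List (String × String)) (k : String) : String := (kget db k).getD ""

-- A: forward fold over data, overwriting the (res, pw) accumulator on every match
def verify_user (id : String) (data : List (List (String × String))) : Bool × String :=
  data.foldl (fun s db => if kgetD db "id" == id then (true, kgetD db "password") else s) (false, "")

-- ===== PORT B =====
-- B: early-exit recursion over the reversed list, no accumulator
def vuGo (id : String) (l : List (List (String × String))) : Bool × String :=
  match l with
  | [] => (false, "")
  | db :: rest => if kgetD db "id" == id then (true, kgetD db "password") else vuGo id rest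

def verify_user_alt (id : String) (data : List (List (String × String))) : Bool × String :=
  vuGo id data.reverse

-- ===== PRECONDITION & SPEC =====
-- Pre_ excludes exactly the inputs where Python raises KeyError: a dict without an 'id'
-- key, or a matching dict without a 'password' key.
def Pre_verify_user (id : String) (data : List (List (String × String))) : Prop :=
  ∀ db ∈ data, "id" ∈ db.map Prod.fst ∧ (db.lookup "id" = some id → "password" ∈ db.map Prod.fst)
instance (id : String) (data : List (List (String × String))) : Decidable (Pre_verify_user id data) := by unfold Pre_verify_user; infer_instance

def pvWitness_verify_user : String × (List (List (String × String))) :=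
  ("u", [[("id", "u"), ("password", "p")], [("id", "v")]])

def Spec_verify_user (id : String) (data : List (List (String × String))) (out : Bool × String) : Prop := out = verify_user_alt id data
instance (id : String) (data : List (List (String × String))) (out : Bool × String) : Decidable (Spec_verify_user id data out) := by unfold Spec_verify_user; infer_instance

-- ===== CLAIM (what is proved, stated in full; the proofs are below) =====
def Claim_equal_verify_user : Prop := ∀ (id : String) (data : List (List (String × String))), Dom_verify_user id data → Pre_verify_user id data → Spec_verify_user id data (verify_user id data)

-- ===== LEMMAS AND PROOFS =====

-- vuGo returns (false, "") whenever its flag is false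
theorem vuGo_false (id : String) (l : List (List (String × String)))
    (h : (vuGo id l).1 = false) : vuGo id l = (false, "") := by
  induction l with
  | nil => rfl
  | cons db rest ih =>
    by_cases hm : (kgetD db "id" == id) = true
    · simp [vuGo, hm] at h
    · simp only [vuGo, if_neg hm] at h ⊢; exact ih h

-- the forward fold from any seed equals "B's answer if it hit, else the seed"
theorem foldl_eq_vuGo (id : String) (l : List (List (String × String))) (s : Bool × String) :
    l.foldl (fun s db => if kgetD db "id" == id then (true, kgetD db "password") else s) s
      = (if (vuGo id l.reverse).1 then vuGo id l.reverse else s) := by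
  induction l using List.reverseRecOn generalizing s with
  | nil => simp [vuGo]
  | append_singleton l' db ih =>
    rw [List.foldl_append, List.foldl_cons, List.foldl_nil, List.reverse_append]
    simp only [List.reverse_cons, List.reverse_nil, List.nil_append, List.singleton_append]
    by_cases hm : (kgetD db "id" == id) = true
    · simp [vuGo, hm]
    · simp only [vuGo, if_neg hm, ih s]

-- ===== VERDICT (by name: the statement is the Claim_ definition above) =====
theorem verify_user_spec : Claim_equal_verify_user := by
  intro id data _ _
  unfold Spec_verify_user verify_user verify_user_alt
  rw [foldl_eq_vuGo]
  by_cases h : (vuGo id data.reverse).1 = true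
  · simp [h]
  · simp only [Bool.not_eq_true] at h
    rw [vuGo_false id _ h]
    simp
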